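-- pv_equiv track=rewrite | github.com/TuanN05/Math---Game-board | main.py | has_valid_pair
-- ===== SOURCE A (Python) =====
-- def has_valid_pair(grid, target):
--     size = len(grid)
--     for row1 in range(size):
--         for col1 in range(size):
--             for row2 in range(size):
--                 for col2 in range(size):
--                     if (row1 != row2 or col1 != col2) and grid[row1][col1] is not None and grid[row2][col2] is not None:
--                         num1 = grid[row1][col1]
--                         num2 = grid[row2][col2]
--                         if num1 + num2 == target or abs(num1 - num2) == target:
--                             return True
--     return False
-- ===== SOURCE B (Python) =====
-- def has_valid_pair(grid, target):
--     size = len(grid)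
--     counts = {}
--     for row in grid:
--         for v in row[:size]:
--             if v is not None:
--                 counts[v] = counts.get(v, 0) + 1
--     for v in counts:
--         if (target - v) in counts and (target - v != v or counts[v] >= 2):
--             return True
--         if target >= 0 and (v + target) in counts and (target != 0 or counts[v] >= 2):
--             return True
--     return False
-- ===== Notes on version B (the rewrite author's own statement) =====
-- stated objective: faster
-- what changed: Replaced the O(n^4) all-pairs-of-cells scan by a single pass that counts cell values in a dict and then, per distinct value v, checks for the sum complement target-v and the difference complement v+target, using the multiplicity for self-pairs.
-- outside the precondition, e.g. on has_valid_pair([[1, 1], [2]], 2): A returns True, B returns True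
import Mathlib
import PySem

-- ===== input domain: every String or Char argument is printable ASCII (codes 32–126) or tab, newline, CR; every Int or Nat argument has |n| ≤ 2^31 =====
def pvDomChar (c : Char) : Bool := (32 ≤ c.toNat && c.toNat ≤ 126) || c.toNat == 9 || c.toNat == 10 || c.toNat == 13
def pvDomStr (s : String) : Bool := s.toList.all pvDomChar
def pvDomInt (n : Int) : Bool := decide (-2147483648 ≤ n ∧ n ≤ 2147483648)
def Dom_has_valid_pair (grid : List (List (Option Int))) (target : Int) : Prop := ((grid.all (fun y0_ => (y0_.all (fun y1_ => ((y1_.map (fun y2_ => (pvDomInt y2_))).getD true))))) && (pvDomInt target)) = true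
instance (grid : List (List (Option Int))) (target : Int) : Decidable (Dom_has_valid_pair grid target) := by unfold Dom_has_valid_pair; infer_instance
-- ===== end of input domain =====

-- B replaces A's four-nested-loop scan over ordered pairs of cells by one counting pass
-- over the cells plus a per-distinct-value complement lookup (objective: faster).

-- ===== PORT A =====
def has_valid_pair (grid : List (List (Option Int))) (target : Int) : Bool :=
  let size : Int := grid.length
  (PySem.List.pyRange 0 size 1).any fun row1 =>
    (PySem.List.pyRange 0 size 1).any fun col1 =>
      (PySem.List.pyRange 0 size 1).any fun row2 =>
        (PySem.List.pyRange 0 size 1).any fun col2 =>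
          if (row1 != row2 || col1 != col2) then
            match PySem.List.pyGetD (PySem.List.pyGetD grid row1 []) col1 none,
                  PySem.List.pyGetD (PySem.List.pyGetD grid row2 []) col2 none with
            | some num1, some num2 => (num1 + num2 == target) || (|num1 - num2| == target)
            | _, _ => false
          else false

-- ===== PORT B =====
def has_valid_pair_alt (grid : List (List (Option Int))) (target : Int) : Bool :=
  let size : Int := grid.length
  let counts : PySem.Dict Int Int :=
    grid.foldl (fun d row =>
      (PySem.List.slice row none (some size)).foldl (fun d v =>
        match v with
        | some x => d.insert x (d.getD x 0 + 1)
        | none => d) d) PySem.Dict.empty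
  counts.keys.any fun v =>
    (counts.contains (target - v) && (target - v != v || counts.getD v 0 ≥ 2))
    || (target ≥ 0 && counts.contains (v + target) && (target != 0 || counts.getD v 0 ≥ 2))

-- ===== PRECONDITION & SPEC =====
-- Pre_ excludes grids having a row shorter than the number of rows: A indexes every row at
-- columns 0..len(grid)-1 and raises IndexError on such a row unless a luckily early pair
-- of cells returns True first; those lucky early returns are the excluded returning inputs.
def Pre_has_valid_pair (grid : List (List (Option Int))) (target : Int) : Prop :=
  ∀ row ∈ grid, grid.length ≤ row.length
instance (grid : List (List (Option Int))) (target : Int) : Decidable (Pre_has_valid_pair grid target) := by unfold Pre_has_valid_pair; infer_instance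

def pvWitness_has_valid_pair : List (List (Option Int)) × Int := ([[some 1, none], [some 2, some 3]], 5)

def Spec_has_valid_pair (grid : List (List (Option Int))) (target : Int) (out : Bool) : Prop := out = has_valid_pair_alt grid target
instance (grid : List (List (Option Int))) (target : Int) (out : Bool) : Decidable (Spec_has_valid_pair grid target out) := by unfold Spec_has_valid_pair; infer_instance

-- ===== CLAIM (what is proved, stated in full; the proofs are below) =====
def Claim_equal_has_valid_pair : Prop := ∀ (grid : List (List (Option Int))) (target : Int), Dom_has_valid_pair grid target → Pre_has_valid_pair grid target → Spec_has_valid_pair grid target (has_valid_pair grid target)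

-- ===== LEMMAS AND PROOFS =====

-- the cell value at (r, c), total form
def pvCell (grid : List (List (Option Int))) (r c : Nat) : Option Int :=
  (grid.getD r []).getD c none

-- the non-None cell values of the top-left size×size square, row-major
def pvVals (grid : List (List (Option Int))) : List Int :=
  grid.flatMap (fun row => (row.take grid.length).filterMap id)

-- the symmetric pair condition
def pvGood (t v w : Int) : Prop := v + w = t ∨ |v - w| = t

theorem pvCount_filterMap_id (l : List (Option Int)) (v : Int) :
    (l.filterMap id).count v = l.count (some v) := by
  rw [show (id : Option Int → Option Int) = fun x => x from rfl]
  induction l with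
  | nil => rfl
  | cons h t ih =>
    cases h with
    | none => simp [ih]
    | some x => by_cases hx : x = v <;> simp [ih, hx]

theorem pvTwo_le_count_iff {α : Type} [BEq α] [LawfulBEq α] (l : List α) (x : α) :
    2 ≤ l.count x ↔ ∃ i j : Nat, i < j ∧ j < l.length ∧ l[i]? = some x ∧ l[j]? = some x := by
  induction l with
  | nil => simp
  | cons h t ih =>
    constructor
    · intro h2
      by_cases hx : h = x
      · subst hx
        rw [List.count_cons_self] at h2
        have hm : h ∈ t := List.count_pos_iff.mp (by omega)
        rw [List.mem_iff_getElem] at hm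
        rcases hm with ⟨j, hj, hjx⟩
        refine ⟨0, j + 1, by omega, by simp; omega, by simp, ?_⟩
        simpa [List.getElem?_eq_getElem hj] using hjx
      · rw [List.count_cons_of_ne (a := x) (b := h) (fun hxh => hx hxh)] at h2
        rcases ih.mp h2 with ⟨i, j, hij, hj, hi', hj'⟩
        exact ⟨i + 1, j + 1, by omega, by simp; omega, by simpa using hi', by simpa using hj'⟩
    · rintro ⟨i, j, hij, hj, hi', hj'⟩
      simp only [List.length_cons] at hj
      cases i with
      | zero =>
        simp only [List.getElem?_cons_zero, Option.some.injEq] at hi'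
        subst hi'
        obtain ⟨j', rfl⟩ : ∃ j', j = j' + 1 := ⟨j - 1, by omega⟩
        have hjt : t[j']? = some h := by simpa using hj'
        have hmem : h ∈ t := List.mem_of_getElem? hjt
        rw [List.count_cons_self]
        have := List.count_pos_iff.mpr hmem
        omega
      | succ i' =>
        obtain ⟨j', rfl⟩ : ∃ j', j = j' + 1 := ⟨j - 1, by omega⟩
        have h2 : 2 ≤ t.count x := ih.mpr ⟨i', j', by omega, by omega, by simpa using hi', by simpa using hj'⟩
        rw [List.count_cons]
        omega

theorem pvRowOne_iff (n : Nat) (row : List (Option Int)) (v : Int) (hlen : n ≤ row.length) :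
    0 < ((row.take n).filterMap id).count v ↔
      ∃ c, c < n ∧ row.getD c none = some v := by
  rw [List.count_pos_iff, List.mem_filterMap]
  constructor
  · rintro ⟨o, ho, hid⟩
    cases o with
    | none => simp at hid
    | some x =>
      simp only [id_eq, Option.some.injEq] at hid; subst hid
      rw [List.mem_iff_getElem] at ho
      rcases ho with ⟨c, hc, hget⟩
      rw [List.length_take] at hc
      refine ⟨c, by omega, ?_⟩
      rw [List.getD_eq_getElem _ none (by omega)]
      rw [← List.getElem_take]
      exact hget
  · rintro ⟨c, hc, hget⟩
    refine ⟨some v, ?_, rfl⟩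
    rw [List.mem_iff_getElem]
    refine ⟨c, by rw [List.length_take]; omega, ?_⟩
    rw [List.getElem_take]
    rw [List.getD_eq_getElem _ none (by omega)] at hget
    exact hget

theorem pvRowTwo_iff (n : Nat) (row : List (Option Int)) (v : Int) (hlen : n ≤ row.length) :
    2 ≤ ((row.take n).filterMap id).count v ↔
      ∃ c1 c2, c1 < n ∧ c2 < n ∧ c1 ≠ c2 ∧
        row.getD c1 none = some v ∧ row.getD c2 none = some v := by
  rw [pvCount_filterMap_id, pvTwo_le_count_iff]
  have hlt : (row.take n).length = n := by rw [List.length_take]; omega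
  constructor
  · rintro ⟨i, j, hij, hj, hi', hj'⟩
    rw [hlt] at hj
    refine ⟨i, j, by omega, hj, by omega, ?_, ?_⟩
    · rw [List.getD_eq_getElem _ none (by omega)]
      rw [List.getElem?_eq_getElem (by omega : i < (row.take n).length)] at hi'
      simpa [List.getElem_take] using hi'
    · rw [List.getD_eq_getElem _ none (by omega)]
      rw [List.getElem?_eq_getElem (by omega : j < (row.take n).length)] at hj'
      simpa [List.getElem_take] using hj'
  · rintro ⟨c1, c2, hc1, hc2, hne, h1, h2⟩
    rcases Nat.lt_or_ge c1 c2 with h | h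
    · refine ⟨c1, c2, h, by omega, ?_, ?_⟩
      · rw [List.getElem?_eq_getElem (by omega : c1 < (row.take n).length), List.getElem_take]
        rw [List.getD_eq_getElem _ none (by omega)] at h1; simp [h1]
      · rw [List.getElem?_eq_getElem (by omega : c2 < (row.take n).length), List.getElem_take]
        rw [List.getD_eq_getElem _ none (by omega)] at h2; simp [h2]
    · refine ⟨c2, c1, by omega, by omega, ?_, ?_⟩
      · rw [List.getElem?_eq_getElem (by omega : c2 < (row.take n).length), List.getElem_take]
        rw [List.getD_eq_getElem _ none (by omega)] at h2; simp [h2]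
      · rw [List.getElem?_eq_getElem (by omega : c1 < (row.take n).length), List.getElem_take]
        rw [List.getD_eq_getElem _ none (by omega)] at h1; simp [h1]

theorem pvOnePos_iff (n : Nat) (g : List (List (Option Int))) (v : Int)
    (hlen : ∀ row ∈ g, n ≤ row.length) :
    0 < (g.flatMap (fun row => (row.take n).filterMap id)).count v ↔
      ∃ r c : Nat, r < g.length ∧ c < n ∧ (g.getD r []).getD c none = some v := by
  induction g with
  | nil => simp
  | cons row rest ih =>
    rw [List.flatMap_cons, List.count_append]
    have hrow := pvRowOne_iff n row v (hlen row (by simp))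
    have ihr := ih (fun r hr => hlen r (by simp [hr]))
    constructor
    · intro h
      rcases Nat.lt_or_ge 0 (((row.take n).filterMap id).count v) with ha | ha
      · rcases hrow.mp ha with ⟨c, hc, hg⟩
        exact ⟨0, c, by simp, hc, hg⟩
      · have hb : 0 < (rest.flatMap (fun row => (row.take n).filterMap id)).count v := by omega
        rcases ihr.mp hb with ⟨r, c, hr, hc, hg⟩
        exact ⟨r + 1, c, by simp; omega, hc, hg⟩
    · rintro ⟨r, c, hr, hc, hg⟩
      cases r with
      | zero =>
        have : 0 < ((row.take n).filterMap id).count v := hrow.mpr ⟨c, hc, hg⟩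
        omega
      | succ r' =>
        have : 0 < (rest.flatMap (fun row => (row.take n).filterMap id)).count v :=
          ihr.mpr ⟨r', c, by simp at hr; omega, hc, hg⟩
        omega

theorem pvPairPos_iff (n : Nat) (g : List (List (Option Int))) (v : Int)
    (hlen : ∀ row ∈ g, n ≤ row.length) :
    2 ≤ (g.flatMap (fun row => (row.take n).filterMap id)).count v ↔
      ∃ r1 c1 r2 c2 : Nat, r1 < g.length ∧ c1 < n ∧ r2 < g.length ∧ c2 < n ∧
        ¬(r1 = r2 ∧ c1 = c2) ∧
        (g.getD r1 []).getD c1 none = some v ∧ (g.getD r2 []).getD c2 none = some v := by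
  induction g with
  | nil => simp
  | cons row rest ih =>
    rw [List.flatMap_cons, List.count_append]
    have hrow1 := pvRowOne_iff n row v (hlen row (by simp))
    have hrow2 := pvRowTwo_iff n row v (hlen row (by simp))
    have hrest := fun r hr => hlen r (List.mem_cons_of_mem _ hr)
    have ihr := ih hrest
    have hone := pvOnePos_iff n rest v hrest
    constructor
    · intro h
      set a := ((row.take n).filterMap id).count v with ha
      set b := (rest.flatMap (fun row => (row.take n).filterMap id)).count v with hb
      rcases Nat.lt_or_ge a 1 with ha0 | ha1
      · -- a = 0, b ≥ 2
        rcases ihr.mp (by omega) with ⟨r1, c1, r2, c2, hr1, hc1, hr2, hc2, hne, h1, h2⟩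
        exact ⟨r1 + 1, c1, r2 + 1, c2, by simp; omega, hc1, by simp; omega, hc2,
          by omega, h1, h2⟩
      · rcases Nat.lt_or_ge a 2 with ha2 | ha2
        · -- a = 1, b ≥ 1
          rcases hrow1.mp (by omega) with ⟨c, hc, hg⟩
          rcases hone.mp (by omega) with ⟨r', c', hr', hc', hg'⟩
          exact ⟨0, c, r' + 1, c', by simp, hc, by simp; omega, hc', by omega, hg, hg'⟩
        · -- a ≥ 2
          rcases hrow2.mp ha2 with ⟨c1, c2, hc1, hc2, hne, h1, h2⟩
          exact ⟨0, c1, 0, c2, by simp, hc1, by simp, hc2, by simp [hne], h1, h2⟩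
    · rintro ⟨r1, c1, r2, c2, hr1, hc1, hr2, hc2, hne, h1, h2⟩
      simp only [List.length_cons] at hr1 hr2
      cases r1 with
      | zero =>
        cases r2 with
        | zero =>
          have hcc : c1 ≠ c2 := by intro h; exact hne ⟨rfl, h⟩
          have : 2 ≤ ((row.take n).filterMap id).count v :=
            hrow2.mpr ⟨c1, c2, hc1, hc2, hcc, h1, h2⟩
          omega
        | succ r2' =>
          have hb : 0 < (rest.flatMap (fun row => (row.take n).filterMap id)).count v :=
            hone.mpr ⟨r2', c2, by omega, hc2, h2⟩
          have haa : 0 < ((row.take n).filterMap id).count v := hrow1.mpr ⟨c1, hc1, h1⟩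
          omega
      | succ r1' =>
        cases r2 with
        | zero =>
          have hb : 0 < (rest.flatMap (fun row => (row.take n).filterMap id)).count v :=
            hone.mpr ⟨r1', c1, by omega, hc1, h1⟩
          have haa : 0 < ((row.take n).filterMap id).count v := hrow1.mpr ⟨c2, hc2, h2⟩
          omega
        | succ r2' =>
          have : 2 ≤ (rest.flatMap (fun row => (row.take n).filterMap id)).count v :=
            ihr.mpr ⟨r1', c1, r2', c2, by omega, hc1, by omega, hc2,
              by intro hx; exact hne ⟨by omega, hx.2⟩, h1, h2⟩
          omega

theorem pvFold_filterMap (l : List (Option Int)) (d : PySem.Dict Int Int) :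
    l.foldl (fun d v => match v with
        | some x => d.insert x (d.getD x 0 + 1)
        | none => d) d
      = (l.filterMap id).foldl (fun d x => d.insert x (d.getD x 0 + 1)) d := by
  induction l generalizing d with
  | nil => rfl
  | cons h t ih => cases h <;> simp [ih]

theorem pvCounts_eq (grid : List (List (Option Int))) :
    grid.foldl (fun d row =>
      (PySem.List.slice row none (some (grid.length : Int))).foldl (fun d v =>
        match v with
        | some x => d.insert x (d.getD x 0 + 1)
        | none => d) d) (PySem.Dict.empty : PySem.Dict Int Int)
      = PySem.Dict.counter (pvVals grid) := by
  have h1 : (fun (d : PySem.Dict Int Int) (row : List (Option Int)) =>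
      (PySem.List.slice row none (some (grid.length : Int))).foldl (fun d v =>
        match v with
        | some x => d.insert x (d.getD x 0 + 1)
        | none => d) d)
      = (fun d row =>
          ((row.take grid.length).filterMap id).foldl (fun d x => d.insert x (d.getD x 0 + 1)) d) := by
    funext d row
    rw [PySem.List.slice_to_natCast, pvFold_filterMap]
  rw [h1, ← List.foldl_flatMap, PySem.Dict.foldl_insert_getD_add_one_eq_counter]
  rfl

theorem pvB_iff (grid : List (List (Option Int))) (target : Int) :
    has_valid_pair_alt grid target = true ↔
      ∃ v ∈ pvVals grid,
        ((target - v) ∈ pvVals grid ∧ (target - v ≠ v ∨ 2 ≤ (pvVals grid).count v)) ∨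
        (0 ≤ target ∧ (v + target) ∈ pvVals grid ∧ (target ≠ 0 ∨ 2 ≤ (pvVals grid).count v)) := by
  unfold has_valid_pair_alt
  simp only []
  rw [pvCounts_eq, List.any_eq_true]
  simp only [PySem.Dict.keys_counter, PySem.Dict.contains_counter, PySem.Dict.getD_counter,
    PySem.Set.mem_ofList, Bool.or_eq_true, Bool.and_eq_true, bne_iff_ne, decide_eq_true_eq,
    List.contains_iff_mem, ne_eq]
  constructor
  · rintro ⟨v, hv, hb⟩
    refine ⟨v, hv, ?_⟩
    rcases hb with ⟨hm, hc⟩ | ⟨⟨ht, hm⟩, hc⟩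
    · exact Or.inl ⟨hm, by rcases hc with h | h; exacts [Or.inl h, Or.inr (by exact_mod_cast h)]⟩
    · exact Or.inr ⟨ht, hm, by rcases hc with h | h; exacts [Or.inl h, Or.inr (by exact_mod_cast h)]⟩
  · rintro ⟨v, hv, hb⟩
    refine ⟨v, hv, ?_⟩
    rcases hb with ⟨hm, hc⟩ | ⟨ht, hm, hc⟩
    · exact Or.inl ⟨hm, by rcases hc with h | h; exacts [Or.inl h, Or.inr (by exact_mod_cast h)]⟩
    · exact Or.inr ⟨⟨ht, hm⟩, by rcases hc with h | h; exacts [Or.inl h, Or.inr (by exact_mod_cast h)]⟩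

theorem pvA_iff (grid : List (List (Option Int))) (target : Int) :
    has_valid_pair grid target = true ↔
      ∃ r1 c1 r2 c2 : Nat, r1 < grid.length ∧ c1 < grid.length ∧ r2 < grid.length ∧
        c2 < grid.length ∧ ¬(r1 = r2 ∧ c1 = c2) ∧
        ∃ a b : Int, pvCell grid r1 c1 = some a ∧ pvCell grid r2 c2 = some b ∧
          pvGood target a b := by
  unfold has_valid_pair
  simp only [List.any_eq_true, PySem.List.mem_pyRange_one]
  constructor
  · rintro ⟨i1, ⟨hi1a, hi1b⟩, j1, ⟨hj1a, hj1b⟩, i2, ⟨hi2a, hi2b⟩, j2, ⟨hj2a, hj2b⟩, hbody⟩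
    obtain ⟨r1, rfl⟩ : ∃ k : Nat, i1 = (k : Int) := ⟨i1.toNat, by omega⟩
    obtain ⟨c1, rfl⟩ : ∃ k : Nat, j1 = (k : Int) := ⟨j1.toNat, by omega⟩
    obtain ⟨r2, rfl⟩ : ∃ k : Nat, i2 = (k : Int) := ⟨i2.toNat, by omega⟩
    obtain ⟨c2, rfl⟩ : ∃ k : Nat, j2 = (k : Int) := ⟨j2.toNat, by omega⟩
    have hcnd : (((r1:Int) != (r2:Int)) || ((c1:Int) != (c2:Int))) = true ↔ ¬(r1 = r2 ∧ c1 = c2) := by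
      simp only [Bool.or_eq_true, bne_iff_ne, ne_eq, Nat.cast_inj]
      tauto
    by_cases hcd : (((r1:Int) != (r2:Int)) || ((c1:Int) != (c2:Int))) = true
    case neg => rw [if_neg hcd] at hbody; cases hbody
    rw [if_pos hcd] at hbody
    · simp only [PySem.List.pyGetD_natCast] at hbody
      refine ⟨r1, c1, r2, c2, by exact_mod_cast hi1b, by exact_mod_cast hj1b,
        by exact_mod_cast hi2b, by exact_mod_cast hj2b, ?_, ?_⟩
      · exact hcnd.mp hcd
      · revert hbody
        unfold pvCell
        cases (grid.getD r1 []).getD c1 none with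
        | none => intro h; cases h
        | some a =>
          cases (grid.getD r2 []).getD c2 none with
          | none => intro h; cases h
          | some b =>
            intro h
            refine ⟨a, b, rfl, rfl, ?_⟩
            simp only [Bool.or_eq_true, beq_iff_eq] at h
            exact h
  · rintro ⟨r1, c1, r2, c2, hr1, hc1, hr2, hc2, hne, a, b, ha, hb, hg⟩
    refine ⟨(r1 : Int), ⟨by omega, by exact_mod_cast hr1⟩,
            (c1 : Int), ⟨by omega, by exact_mod_cast hc1⟩,
            (r2 : Int), ⟨by omega, by exact_mod_cast hr2⟩,
            (c2 : Int), ⟨by omega, by exact_mod_cast hc2⟩, ?_⟩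
    rw [if_pos (by simp only [Bool.or_eq_true, bne_iff_ne, ne_eq, Nat.cast_inj]; tauto)]
    · simp only [PySem.List.pyGetD_natCast]
      unfold pvCell at ha hb
      rw [ha, hb]
      simp only [Bool.or_eq_true, beq_iff_eq]
      exact hg

theorem pvKey (grid : List (List (Option Int))) (target : Int)
    (hlen : ∀ row ∈ grid, grid.length ≤ row.length) :
    (∃ r1 c1 r2 c2 : Nat, r1 < grid.length ∧ c1 < grid.length ∧ r2 < grid.length ∧
        c2 < grid.length ∧ ¬(r1 = r2 ∧ c1 = c2) ∧
        ∃ a b : Int, pvCell grid r1 c1 = some a ∧ pvCell grid r2 c2 = some b ∧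
          pvGood target a b)
    ↔ (∃ v ∈ pvVals grid,
        ((target - v) ∈ pvVals grid ∧ (target - v ≠ v ∨ 2 ≤ (pvVals grid).count v)) ∨
        (0 ≤ target ∧ (v + target) ∈ pvVals grid ∧ (target ≠ 0 ∨ 2 ≤ (pvVals grid).count v))) := by
  have hmem : ∀ x : Int, x ∈ pvVals grid ↔
      ∃ r c : Nat, r < grid.length ∧ c < grid.length ∧ pvCell grid r c = some x := by
    intro x
    rw [← List.count_pos_iff]
    exact pvOnePos_iff grid.length grid x hlen
  have hpair : ∀ x : Int, 2 ≤ (pvVals grid).count x ↔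
      ∃ r1 c1 r2 c2 : Nat, r1 < grid.length ∧ c1 < grid.length ∧ r2 < grid.length ∧
        c2 < grid.length ∧ ¬(r1 = r2 ∧ c1 = c2) ∧
        pvCell grid r1 c1 = some x ∧ pvCell grid r2 c2 = some x :=
    fun x => pvPairPos_iff grid.length grid x hlen
  constructor
  · rintro ⟨r1, c1, r2, c2, hr1, hc1, hr2, hc2, hne, a, b, ha, hb, hg⟩
    have hva : a ∈ pvVals grid := (hmem a).mpr ⟨r1, c1, hr1, hc1, ha⟩
    have hvb : b ∈ pvVals grid := (hmem b).mpr ⟨r2, c2, hr2, hc2, hb⟩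
    rcases hg with hsum | hdiff
    · -- a + b = target
      refine ⟨a, hva, Or.inl ⟨by rw [show target - a = b by omega]; exact hvb, ?_⟩⟩
      by_cases hab : b = a
      · refine Or.inr ((hpair a).mpr ⟨r1, c1, r2, c2, hr1, hc1, hr2, hc2, hne, ha, ?_⟩)
        rw [hb, hab]
      · exact Or.inl (by omega)
    · -- |a - b| = target
      have ht : 0 ≤ target := hdiff ▸ abs_nonneg _
      rcases abs_cases (a - b) with ⟨he, _⟩ | ⟨he, _⟩ <;> rw [he] at hdiff
      · -- a - b = target, so a = b + target : use v := b
        refine ⟨b, hvb, Or.inr ⟨ht, by rw [show b + target = a by omega]; exact hva, ?_⟩⟩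
        by_cases ht0 : target = 0
        · refine Or.inr ((hpair b).mpr ⟨r1, c1, r2, c2, hr1, hc1, hr2, hc2, hne, ?_, hb⟩)
          rw [ha, show a = b by omega]
        · exact Or.inl ht0
      · -- b - a = target : use v := a
        refine ⟨a, hva, Or.inr ⟨ht, by rw [show a + target = b by omega]; exact hvb, ?_⟩⟩
        by_cases ht0 : target = 0
        · refine Or.inr ((hpair a).mpr ⟨r1, c1, r2, c2, hr1, hc1, hr2, hc2, hne, ha, ?_⟩)
          rw [hb, show b = a by omega]
        · exact Or.inl ht0
  · rintro ⟨v, hv, ⟨hm, hcnd⟩ | ⟨ht, hm, hcnd⟩⟩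
    · -- sum branch
      by_cases hvv : target - v = v
      · have h2 : 2 ≤ (pvVals grid).count v := by tauto
        rcases (hpair v).mp h2 with ⟨r1, c1, r2, c2, hr1, hc1, hr2, hc2, hne, h1, h2'⟩
        exact ⟨r1, c1, r2, c2, hr1, hc1, hr2, hc2, hne, v, v, h1, h2', Or.inl (by omega)⟩
      · rcases (hmem v).mp hv with ⟨r1, c1, hr1, hc1, h1⟩
        rcases (hmem (target - v)).mp hm with ⟨r2, c2, hr2, hc2, h2'⟩
        have hne : ¬(r1 = r2 ∧ c1 = c2) := by
          rintro ⟨rfl, rfl⟩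
          rw [h1] at h2'
          exact hvv (by injection h2' with h; omega)
        exact ⟨r1, c1, r2, c2, hr1, hc1, hr2, hc2, hne, v, target - v, h1, h2',
          Or.inl (by omega)⟩
    · -- diff branch
      by_cases ht0 : target = 0
      · have h2 : 2 ≤ (pvVals grid).count v := by tauto
        rcases (hpair v).mp h2 with ⟨r1, c1, r2, c2, hr1, hc1, hr2, hc2, hne, h1, h2'⟩
        exact ⟨r1, c1, r2, c2, hr1, hc1, hr2, hc2, hne, v, v, h1, h2',
          Or.inr (by simp [ht0])⟩
      · rcases (hmem v).mp hv with ⟨r1, c1, hr1, hc1, h1⟩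
        rcases (hmem (v + target)).mp hm with ⟨r2, c2, hr2, hc2, h2'⟩
        have hne : ¬(r1 = r2 ∧ c1 = c2) := by
          rintro ⟨rfl, rfl⟩
          rw [h1] at h2'
          exact ht0 (by injection h2' with h; omega)
        refine ⟨r1, c1, r2, c2, hr1, hc1, hr2, hc2, hne, v, v + target, h1, h2', Or.inr ?_⟩
        rw [show v - (v + target) = -target by ring, abs_neg, abs_of_nonneg ht]

-- ===== VERDICT (by name: the statement is the Claim_ definition above) =====
theorem has_valid_pair_spec : Claim_equal_has_valid_pair := by
  intro grid target _dom hpre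
  unfold Spec_has_valid_pair
  have hiff : has_valid_pair grid target = true ↔ has_valid_pair_alt grid target = true := by
    rw [pvA_iff grid target, pvB_iff grid target]
    exact pvKey grid target hpre
  cases h1 : has_valid_pair grid target <;> cases h2 : has_valid_pair_alt grid target <;>
    simp_all
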